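-- pv_equiv track=rewrite | github.com/anandawira/HackerrankProjects | COVID-19 Relief for India Coding Challenge/2. Analytical thinking with Alphabets.py | getShortestSubstring
-- ===== SOURCE A (Python) =====
-- import string
-- import itertools
--
-- def getDuplicateChar(s):
--     chars = [c for c in string.ascii_lowercase if s.count(c)>1]
--     duplicates = {}
--     for char in chars:
--         duplicates[char] = [idx for idx, val in enumerate(s) if val == char]
--     return duplicates
--
-- def getShortestSubstring(s):
--     duplicates = getDuplicateChar(s)
--     if len(duplicates) == 0:
--         return 0
--
--     shortest = len(s)
--     for isFirsts in itertools.product([True, False], repeat=len(duplicates)):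
--         vals = []
--         for idx, val in enumerate(duplicates.values()):
--             if isFirsts[idx]:
--                 vals += val[1:]
--             else:
--                 vals += val[:-1]
--
--         substringLength = max(vals) - min(vals) + 1
--         if substringLength<shortest:
--             shortest = substringLength
--     return shortest
-- ===== SOURCE B (Python) =====
-- import string
--
-- def getShortestSubstring(s):
--     # Per duplicate letter only its first/second/second-last/last positions matter;
--     # sweep candidate global minima instead of trying all 2^k drop-first/drop-last choices.
--     opts = []
--     for c in string.ascii_lowercase:
--         idxs = [i for i, ch in enumerate(s) if ch == c]
--         if len(idxs) >= 2:
--             opts.append((idxs[0], idxs[1], idxs[-2], idxs[-1]))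
--     if not opts:
--         return 0
--     cands = [f for (f, _, _, _) in opts] + [s2 for (_, s2, _, _) in opts]
--     best = None
--     for m in cands:
--         if all(s2 >= m for (_, s2, _, _) in opts):
--             hi = max((p if f >= m else l) for (f, _, p, l) in opts)
--             span = hi - m + 1
--             if best is None or span < best:
--                 best = span
--     return best
-- ===== Notes on version B (the rewrite author's own statement) =====
-- stated objective: faster
-- what changed: A tries all 2^k drop-first/drop-last combinations over the k duplicate letters; B keeps only each duplicate letter's first/second/second-last/last positions and sweeps the 2k candidate global minima, greedily picking the smallest feasible maximum for each, which is O(k^2) after one O(26*n) collection pass.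
import Mathlib
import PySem

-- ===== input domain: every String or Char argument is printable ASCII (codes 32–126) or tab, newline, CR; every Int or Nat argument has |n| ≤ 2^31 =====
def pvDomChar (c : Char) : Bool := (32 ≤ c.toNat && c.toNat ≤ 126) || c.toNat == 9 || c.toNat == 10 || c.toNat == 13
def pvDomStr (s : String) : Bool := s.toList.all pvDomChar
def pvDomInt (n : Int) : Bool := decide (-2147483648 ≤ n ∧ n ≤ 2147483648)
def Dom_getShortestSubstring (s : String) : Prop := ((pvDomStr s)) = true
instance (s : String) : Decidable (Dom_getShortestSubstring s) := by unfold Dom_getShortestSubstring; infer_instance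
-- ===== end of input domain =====

-- B replaces A's exponential enumeration of all drop-first/drop-last choices (2^k for k
-- duplicate letters) by a quadratic sweep over candidate global minima; measured faster.

-- helpers shared by both sources: string.ascii_lowercase and the index-list comprehension
-- '[idx for idx, val in enumerate(s) if val == char]' appear verbatim in A and in B
def pvAlph : List Char := "abcdefghijklmnopqrstuvwxyz".toList

def pvIdxList (s : String) (c : Char) : List Int :=
  ((PySem.List.enumerate s.toList 0).filter (fun p => p.2 == c)).map (fun p => p.1)

-- ===== PORT A =====
-- itertools.product([True, False], repeat=n), in CPython's order (last coordinate fastest)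
def pvProductTF : Nat → List (List Bool)
  | 0 => [[]]
  | n + 1 => (pvProductTF n).map (true :: ·) ++ (pvProductTF n).map (false :: ·)

def getDuplicateChar (s : String) : PySem.Dict Char (List Int) :=
  let chars := pvAlph.filter (fun c => 1 < PySem.Str.count s (String.ofList [c]))
  chars.foldl (fun d c => d.insert c (pvIdxList s c)) PySem.Dict.empty

def getShortestSubstring (s : String) : Int :=
  let duplicates := getDuplicateChar s
  if PySem.Dict.size duplicates = 0 then 0
  else
    (pvProductTF (PySem.Dict.values duplicates).length).foldl
      (fun shortest isFirsts =>
        let vals : List Int :=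
          (PySem.List.enumerate (PySem.Dict.values duplicates) 0).foldl
            (fun vals p =>
              if PySem.List.pyGetD isFirsts p.1 true then
                vals ++ PySem.List.slice p.2 (some 1) none
              else
                vals ++ PySem.List.slice p.2 none (some (-1))) []
        let substringLength :=
          (PySem.List.max? vals (fun x => x)).getD 0 - (PySem.List.min? vals (fun x => x)).getD 0 + 1
        if substringLength < shortest then substringLength else shortest)
      (PySem.Str.len s)

-- ===== PORT B =====
def getShortestSubstring_alt (s : String) : Int :=
  let opts := pvAlph.foldl (fun opts c =>
      let idxs := pvIdxList s c
      if 2 ≤ idxs.length then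
        opts ++ [(PySem.List.pyGetD idxs 0 0, PySem.List.pyGetD idxs 1 0,
                  PySem.List.pyGetD idxs (-2) 0, PySem.List.pyGetD idxs (-1) 0)]
      else opts) ([] : List (Int × Int × Int × Int))
  if opts = [] then 0
  else
    let cands := opts.map (fun o => o.1) ++ opts.map (fun o => o.2.1)
    let best := cands.foldl (fun best m =>
      if opts.all (fun o => m ≤ o.2.1) then
        let hi := (PySem.List.max?
          (opts.map (fun o => if m ≤ o.1 then o.2.2.1 else o.2.2.2)) (fun x => x)).getD 0
        let span := hi - m + 1
        match best with
        | none => some span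
        | some b => if span < b then some span else some b
      else best) (none : Option Int)
    best.getD 0

-- ===== PRECONDITION & SPEC =====
def Spec_getShortestSubstring (s : String) (out : Int) : Prop := out = getShortestSubstring_alt s
instance (s : String) (out : Int) : Decidable (Spec_getShortestSubstring s out) := by unfold Spec_getShortestSubstring; infer_instance

-- ===== CLAIM (what is proved, stated in full; the proofs are below) =====
def Claim_equal_getShortestSubstring : Prop := ∀ (s : String), Dom_getShortestSubstring s → Spec_getShortestSubstring s (getShortestSubstring s)

-- ===== LEMMAS AND PROOFS =====

-- s.count(c) for a single character is the character count of the code-point list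
theorem pv_count_go_singleton (c : Char) : ∀ (fuel : Nat) (l : List Char) (acc : Nat), l.length ≤ fuel →
    PySem.Chars.count.go [c] fuel l acc = acc + l.count c
  | 0, [], acc, _ => by simp [PySem.Chars.count.go]
  | 0, (x :: t), acc, h => by simp at h
  | (f+1), [], acc, _ => by simp [PySem.Chars.count.go]
  | (f+1), (x :: t), acc, h => by
    rw [PySem.Chars.count.go]
    have h2 : t.length ≤ f := by simpa using h
    by_cases hx : c = x
    · subst hx
      simp [List.isPrefixOf, pv_count_go_singleton c f t (acc+1) h2]
      omega
    · have hpre : ([c].isPrefixOf (x :: t)) = false := by simp [List.isPrefixOf, hx]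
      simp [hpre, pv_count_go_singleton c f t acc h2, Ne.symm hx]

theorem pv_count_singleton (s : String) (c : Char) :
    PySem.Str.count s (String.ofList [c]) = s.toList.count c := by
  rw [PySem.Str.count_eq, PySem.Chars.count]
  rw [if_neg (by simp)]
  simpa using pv_count_go_singleton c s.toList.length s.toList 0 le_rfl

theorem pv_length_idxList (s : String) (c : Char) :
    (pvIdxList s c).length = s.toList.count c := by
  rw [pvIdxList, List.length_map, ← List.countP_eq_length_filter]
  have h : List.countP (fun p => p.2 == c) (PySem.List.enumerate s.toList 0)
      = List.countP (fun x => x == c) ((PySem.List.enumerate s.toList 0).map (·.2)) := by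
    rw [List.countP_map]; rfl
  rw [h, PySem.List.map_snd_enumerate, List.count_eq_countP]

-- the duplicate characters, in alphabetical order, and their index lists
def pvDupChars (s : String) : List Char :=
  pvAlph.filter (fun c => decide (2 ≤ (pvIdxList s c).length))

def pvVlists (s : String) : List (List Int) := (pvDupChars s).map (pvIdxList s)

def pvQuad (L : List Int) : Int × Int × Int × Int :=
  (PySem.List.pyGetD L 0 0, PySem.List.pyGetD L 1 0,
   PySem.List.pyGetD L (-2) 0, PySem.List.pyGetD L (-1) 0)

theorem pv_chars_eq (s : String) :
    pvAlph.filter (fun c => 1 < PySem.Str.count s (String.ofList [c])) = pvDupChars s := by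
  rw [pvDupChars]
  apply List.filter_congr
  intro c _
  rw [pv_count_singleton, ← pv_length_idxList]
  simp [Nat.lt_iff_add_one_le]

theorem pv_dupChars_nodup (s : String) : (pvDupChars s).Nodup :=
  List.Nodup.filter _ (by decide)

theorem pv_items_eq (s : String) :
    (getDuplicateChar s).items = (pvDupChars s).map (fun c => (c, pvIdxList s c)) := by
  rw [getDuplicateChar]
  simp only [pv_chars_eq]
  have := PySem.Dict.items_foldl_insert_fresh (pvDupChars s) (fun c => c) (fun c => pvIdxList s c)
    PySem.Dict.empty (by intro a _; simp [PySem.Dict.contains_empty]) (by simpa using pv_dupChars_nodup s)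
  simpa using this

theorem pv_values_eq (s : String) : (getDuplicateChar s).values = pvVlists s := by
  rw [PySem.Dict.values, pv_items_eq, pvVlists, List.map_map]
  rfl

theorem pv_size_eq (s : String) : PySem.Dict.size (getDuplicateChar s) = (pvDupChars s).length := by
  rw [PySem.Dict.size, pv_items_eq, List.length_map]
-- max(xs)/min(xs) as A and B write them, with their defining properties
def pvMaxv (l : List Int) : Int := (PySem.List.max? l (fun x => x)).getD 0
def pvMinv (l : List Int) : Int := (PySem.List.min? l (fun x => x)).getD 0

theorem pvMaxv_mem (l : List Int) (h : l ≠ []) : pvMaxv l ∈ l := by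
  rcases hm : PySem.List.max? l (fun x => x) with _ | m
  · exact absurd ((PySem.List.max?_eq_none_iff l _).mp hm) h
  · rw [pvMaxv, hm]; exact PySem.List.max?_mem hm

theorem pvMaxv_ge (l : List Int) {y : Int} (hy : y ∈ l) : y ≤ pvMaxv l := by
  rcases hm : PySem.List.max? l (fun x => x) with _ | m
  · exact absurd ((PySem.List.max?_eq_none_iff l _).mp hm) (List.ne_nil_of_mem hy)
  · rw [pvMaxv, hm]; exact PySem.List.max?_isMax hm y hy

theorem pvMinv_mem (l : List Int) (h : l ≠ []) : pvMinv l ∈ l := by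
  rcases hm : PySem.List.min? l (fun x => x) with _ | m
  · exact absurd ((PySem.List.min?_eq_none_iff l _).mp hm) h
  · rw [pvMinv, hm]; exact PySem.List.min?_mem hm

theorem pvMinv_le (l : List Int) {y : Int} (hy : y ∈ l) : pvMinv l ≤ y := by
  rcases hm : PySem.List.min? l (fun x => x) with _ | m
  · exact absurd ((PySem.List.min?_eq_none_iff l _).mp hm) (List.ne_nil_of_mem hy)
  · rw [pvMinv, hm]; exact PySem.List.min?_isMin hm y hy

theorem pvMaxv_eq (l : List Int) {M : Int} (hM : M ∈ l) (hub : ∀ y ∈ l, y ≤ M) :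
    pvMaxv l = M :=
  le_antisymm (hub _ (pvMaxv_mem l (List.ne_nil_of_mem hM))) (pvMaxv_ge l hM)

theorem pvMinv_eq (l : List Int) {M : Int} (hM : M ∈ l) (hlb : ∀ y ∈ l, M ≤ y) :
    pvMinv l = M :=
  le_antisymm (pvMinv_le l hM) (hlb _ (pvMinv_mem l (List.ne_nil_of_mem hM)))

-- A's main loop and B's computation after the collection pass, abstracted over the data
def pvAfold (vs : List (List Int)) (N : Int) : Int :=
  (pvProductTF vs.length).foldl
    (fun shortest isFirsts =>
      let vals : List Int :=
        (PySem.List.enumerate vs 0).foldl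
          (fun vals p =>
            if PySem.List.pyGetD isFirsts p.1 true then
              vals ++ PySem.List.slice p.2 (some 1) none
            else
              vals ++ PySem.List.slice p.2 none (some (-1))) []
      let substringLength :=
        (PySem.List.max? vals (fun x => x)).getD 0 - (PySem.List.min? vals (fun x => x)).getD 0 + 1
      if substringLength < shortest then substringLength else shortest) N

def pvBcalc (os : List (Int × Int × Int × Int)) : Int :=
  if os = [] then 0
  else
    let cands := os.map (fun o => o.1) ++ os.map (fun o => o.2.1)
    let best := cands.foldl (fun best m =>
      if os.all (fun o => m ≤ o.2.1) then
        let hi := (PySem.List.max?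
          (os.map (fun o => if m ≤ o.1 then o.2.2.1 else o.2.2.2)) (fun x => x)).getD 0
        let span := hi - m + 1
        match best with
        | none => some span
        | some b => if span < b then some span else some b
      else best) (none : Option Int)
    best.getD 0

theorem pv_A_eq (s : String) :
    getShortestSubstring s =
      if (pvDupChars s).length = 0 then 0 else pvAfold (pvVlists s) (PySem.Str.len s) := by
  rw [getShortestSubstring, pvAfold]
  simp only [pv_size_eq, pv_values_eq]

theorem pv_B_eq (s : String) :
    getShortestSubstring_alt s = pvBcalc ((pvVlists s).map pvQuad) := by
  have hopts : pvAlph.foldl (fun opts c =>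
      let idxs := pvIdxList s c
      if 2 ≤ idxs.length then
        opts ++ [(PySem.List.pyGetD idxs 0 0, PySem.List.pyGetD idxs 1 0,
                  PySem.List.pyGetD idxs (-2) 0, PySem.List.pyGetD idxs (-1) 0)]
      else opts) ([] : List (Int × Int × Int × Int)) = (pvVlists s).map pvQuad := by
    have := PySem.List.foldl_append_ite (fun c => 2 ≤ (pvIdxList s c).length)
      (fun c => pvQuad (pvIdxList s c)) pvAlph ([] : List (Int × Int × Int × Int))
    simp only [pvQuad] at this
    rw [this, pvVlists, pvDupChars, List.map_map]
    rfl
  rw [getShortestSubstring_alt, pvBcalc]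
  simp only [hopts]

-- membership in the product list is exactly having the right length
theorem pv_mem_productTF (n : Nat) (bs : List Bool) : bs ∈ pvProductTF n ↔ bs.length = n := by
  induction n generalizing bs with
  | zero => simp [pvProductTF, List.length_eq_zero_iff]
  | succ k ih =>
    constructor
    · intro h
      rw [pvProductTF] at h
      rcases List.mem_append.mp h with h | h <;>
        · obtain ⟨t, ht, rfl⟩ := List.mem_map.mp h
          simp [(ih _).mp ht]
    · intro h
      rcases bs with _ | ⟨b, t⟩
      · simp at h
      · have ht : t ∈ pvProductTF k := (ih _).mpr (by simpa using h)
        rw [pvProductTF]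
        rcases b with _ | _
        · exact List.mem_append_right _ (List.mem_map.mpr ⟨t, ht, rfl⟩)
        · exact List.mem_append_left _ (List.mem_map.mpr ⟨t, ht, rfl⟩)

-- sortedness and range of the index lists
theorem pv_idxList_sorted (s : String) (c : Char) : (pvIdxList s c).Pairwise (· < ·) := by
  rw [pvIdxList, List.pairwise_map]
  exact (PySem.List.pairwise_lt_enumerate s.toList 0).filter _

theorem pv_idxList_bounds (s : String) (c : Char) :
    ∀ x ∈ pvIdxList s c, 0 ≤ x ∧ x < (s.toList.length : Int) := by
  intro x hx
  rw [pvIdxList] at hx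
  obtain ⟨p, hp, rfl⟩ := List.mem_map.mp hx
  have hp' := List.mem_of_mem_filter hp
  obtain ⟨k, hk, rfl⟩ := (PySem.List.mem_enumerate_iff _ _ _).mp hp'
  have hk' : k < s.length := String.length_toList ▸ hk
  simp
  omega

theorem pv_sorted_getElem_mono (L : List Int) (h : L.Pairwise (· ≤ ·)) {i j : Nat}
    (hij : i ≤ j) (hj : j < L.length) : L[i]'(lt_of_le_of_lt hij hj) ≤ L[j] := by
  rcases Nat.lt_or_ge i j with hlt | hge
  · exact (List.pairwise_iff_getElem.mp h) i j _ hj hlt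
  · have : i = j := le_antisymm hij hge
    subst this; rfl

-- the four retained positions of a sorted list of length ≥ 2
theorem pv_quad_eq (L : List Int) (h2 : 2 ≤ L.length) :
    pvQuad L = (L[0]'(by omega), L[1]'(by omega),
      L[L.length - 2]'(by omega), L[L.length - 1]'(by omega)) := by
  rw [pvQuad]
  rw [PySem.List.pyGetD_neg_ofNat L 2 0 (by omega) (by omega)]
  rw [PySem.List.pyGetD_neg_ofNat L 1 0 (by omega) (by omega)]
  rw [PySem.List.pyGetD_ofNat' L 0 0, PySem.List.pyGetD_ofNat' L 1 0]
  rw [List.getD_eq_getElem L 0 (by omega), List.getD_eq_getElem L 0 (by omega)]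

-- chosen highs and lows of a choice vector
def pvHis (os : List (Int × Int × Int × Int)) (bs : List Bool) : List Int :=
  (os.zip bs).map (fun ob => if ob.2 then ob.1.2.2.2 else ob.1.2.2.1)

def pvLos (os : List (Int × Int × Int × Int)) (bs : List Bool) : List Int :=
  (os.zip bs).map (fun ob => if ob.2 then ob.1.2.1 else ob.1.1)

theorem pv_tail_max (L : List Int) (h2 : 2 ≤ L.length) (hs : L.Pairwise (· ≤ ·)) :
    L[L.length-1]'(by omega) ∈ L.tail ∧ ∀ y ∈ L.tail, y ≤ L[L.length-1]'(by omega) := by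
  constructor
  · exact List.mem_iff_getElem.mpr ⟨L.length - 2, by simp [List.length_tail]; omega,
      by rw [List.getElem_tail]; congr 1; omega⟩
  · intro y hy
    obtain ⟨i, hi, rfl⟩ := List.mem_iff_getElem.mp hy
    rw [List.getElem_tail]
    exact pv_sorted_getElem_mono L hs (by simp [List.length_tail] at hi; omega) (by omega)

theorem pv_tail_min (L : List Int) (h2 : 2 ≤ L.length) (hs : L.Pairwise (· ≤ ·)) :
    L[1]'(by omega) ∈ L.tail ∧ ∀ y ∈ L.tail, L[1]'(by omega) ≤ y := by
  constructor
  · exact List.mem_iff_getElem.mpr ⟨0, by simp [List.length_tail]; omega,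
      by rw [List.getElem_tail]⟩
  · intro y hy
    obtain ⟨i, hi, rfl⟩ := List.mem_iff_getElem.mp hy
    rw [List.getElem_tail]
    exact pv_sorted_getElem_mono L hs (by omega) (by simp [List.length_tail] at hi; omega)

theorem pv_dropLast_max (L : List Int) (h2 : 2 ≤ L.length) (hs : L.Pairwise (· ≤ ·)) :
    L[L.length-2]'(by omega) ∈ L.dropLast ∧ ∀ y ∈ L.dropLast, y ≤ L[L.length-2]'(by omega) := by
  constructor
  · exact List.mem_iff_getElem.mpr ⟨L.length - 2, by simp [List.length_dropLast]; omega,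
      by rw [List.getElem_dropLast]⟩
  · intro y hy
    obtain ⟨i, hi, rfl⟩ := List.mem_iff_getElem.mp hy
    rw [List.getElem_dropLast]
    exact pv_sorted_getElem_mono L hs (by simp [List.length_dropLast] at hi; omega) (by omega)

theorem pv_dropLast_min (L : List Int) (h2 : 2 ≤ L.length) (hs : L.Pairwise (· ≤ ·)) :
    L[0]'(by omega) ∈ L.dropLast ∧ ∀ y ∈ L.dropLast, L[0]'(by omega) ≤ y := by
  constructor
  · exact List.mem_iff_getElem.mpr ⟨0, by simp [List.length_dropLast]; omega,
      by rw [List.getElem_dropLast]⟩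
  · intro y hy
    obtain ⟨i, hi, rfl⟩ := List.mem_iff_getElem.mp hy
    rw [List.getElem_dropLast]
    exact pv_sorted_getElem_mono L hs (by omega) (by simp [List.length_dropLast] at hi; omega)

-- A's inner loop builds the concatenation of the chosen slices
theorem pv_vals_eq (vs : List (List Int)) (bs : List Bool) :
    (PySem.List.enumerate vs 0).foldl
      (fun vals p =>
        if PySem.List.pyGetD bs p.1 true then
          vals ++ PySem.List.slice p.2 (some 1) none
        else
          vals ++ PySem.List.slice p.2 none (some (-1))) []
    = (PySem.List.enumerate vs 0).flatMap (fun p =>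
        if PySem.List.pyGetD bs p.1 true then
          PySem.List.slice p.2 (some 1) none
        else
          PySem.List.slice p.2 none (some (-1))) := by
  have hbody : (fun (vals : List Int) (p : Int × List Int) =>
      if PySem.List.pyGetD bs p.1 true then
        vals ++ PySem.List.slice p.2 (some 1) none
      else
        vals ++ PySem.List.slice p.2 none (some (-1)))
    = (fun vals p => vals ++ (if PySem.List.pyGetD bs p.1 true then
        PySem.List.slice p.2 (some 1) none else PySem.List.slice p.2 none (some (-1)))) := by
    funext vals p; split_ifs <;> rfl
  rw [hbody, PySem.List.foldl_append_eq_flatMap]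
  rfl

theorem pv_piece_eq (vs : List (List Int)) (bs : List Bool) (hlen : bs.length = vs.length)
    (i : Nat) (hi : i < vs.length) :
    (if PySem.List.pyGetD bs ((0:Int) + (i : Int)) true then
        PySem.List.slice (vs[i]) (some 1) none
      else PySem.List.slice (vs[i]) none (some (-1)))
    = if bs[i]'(by omega) then (vs[i]).tail else (vs[i]).dropLast := by
  have h0 : ((0:Int) + (i : Int)) = ((i : Nat) : Int) := by omega
  rw [h0, PySem.List.pyGetD_natCast, List.getD_eq_getElem bs true (by omega),
    PySem.List.slice_from_one, PySem.List.slice_to_neg_one]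

theorem pv_quad1 (L : List Int) (h2 : 2 ≤ L.length) : (pvQuad L).1 = L[0]'(by omega) := by
  rw [pv_quad_eq L h2]

theorem pv_quad2 (L : List Int) (h2 : 2 ≤ L.length) : (pvQuad L).2.1 = L[1]'(by omega) := by
  rw [pv_quad_eq L h2]

theorem pv_quad3 (L : List Int) (h2 : 2 ≤ L.length) :
    (pvQuad L).2.2.1 = L[L.length - 2]'(by omega) := by
  rw [pv_quad_eq L h2]

theorem pv_quad4 (L : List Int) (h2 : 2 ≤ L.length) :
    (pvQuad L).2.2.2 = L[L.length - 1]'(by omega) := by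
  rw [pv_quad_eq L h2]

theorem pv_span_eq (vs : List (List Int)) (bs : List Bool)
    (hne : vs ≠ []) (hlen : bs.length = vs.length)
    (h2 : ∀ L ∈ vs, 2 ≤ L.length) (hsort : ∀ L ∈ vs, L.Pairwise (· < ·)) :
    ((PySem.List.max? ((PySem.List.enumerate vs 0).foldl
        (fun vals p =>
          if PySem.List.pyGetD bs p.1 true then
            vals ++ PySem.List.slice p.2 (some 1) none
          else
            vals ++ PySem.List.slice p.2 none (some (-1))) []) (fun x => x)).getD 0)
      - ((PySem.List.min? ((PySem.List.enumerate vs 0).foldl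
        (fun vals p =>
          if PySem.List.pyGetD bs p.1 true then
            vals ++ PySem.List.slice p.2 (some 1) none
          else
            vals ++ PySem.List.slice p.2 none (some (-1))) []) (fun x => x)).getD 0) + 1
    = pvMaxv (pvHis (vs.map pvQuad) bs) - pvMinv (pvLos (vs.map pvQuad) bs) + 1 := by
  have hkpos : 0 < vs.length := List.length_pos_of_ne_nil hne
  have hsle : ∀ L ∈ vs, L.Pairwise (· ≤ ·) := fun L hL => (hsort L hL).imp le_of_lt
  have hhis_len : (pvHis (vs.map pvQuad) bs).length = vs.length := by
    simp [pvHis, hlen]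
  have hlos_len : (pvLos (vs.map pvQuad) bs).length = vs.length := by
    simp [pvLos, hlen]
  have hhis_get : ∀ (i : Nat) (hi : i < vs.length),
      (pvHis (vs.map pvQuad) bs)[i]'(by omega) =
        if bs[i]'(by omega) then (pvQuad (vs[i])).2.2.2 else (pvQuad (vs[i])).2.2.1 := by
    intro i hi
    simp [pvHis, List.getElem_zip]
  have hlos_get : ∀ (i : Nat) (hi : i < vs.length),
      (pvLos (vs.map pvQuad) bs)[i]'(by omega) =
        if bs[i]'(by omega) then (pvQuad (vs[i])).2.1 else (pvQuad (vs[i])).1 := by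
    intro i hi
    simp [pvLos, List.getElem_zip]
  rw [pv_vals_eq]
  have hmem_vals : ∀ y : Int,
      y ∈ (PySem.List.enumerate vs 0).flatMap (fun p =>
        if PySem.List.pyGetD bs p.1 true then
          PySem.List.slice p.2 (some 1) none
        else
          PySem.List.slice p.2 none (some (-1))) ↔
      ∃ (i : Nat) (hi : i < vs.length),
        y ∈ (if bs[i]'(by omega) then (vs[i]).tail else (vs[i]).dropLast) := by
    intro y
    rw [List.mem_flatMap]
    constructor
    · rintro ⟨p, hp, hyp⟩
      obtain ⟨i, hi, rfl⟩ := (PySem.List.mem_enumerate_iff _ _ _).mp hp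
      rw [pv_piece_eq vs bs hlen i hi] at hyp
      exact ⟨i, hi, hyp⟩
    · rintro ⟨i, hi, hy⟩
      refine ⟨((0:Int) + (i : Int), vs[i]), (PySem.List.mem_enumerate_iff _ _ _).mpr ⟨i, hi, rfl⟩, ?_⟩
      rw [pv_piece_eq vs bs hlen i hi]
      exact hy
  have hmax : pvMaxv ((PySem.List.enumerate vs 0).flatMap (fun p =>
        if PySem.List.pyGetD bs p.1 true then
          PySem.List.slice p.2 (some 1) none
        else
          PySem.List.slice p.2 none (some (-1)))) = pvMaxv (pvHis (vs.map pvQuad) bs) := by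
    apply pvMaxv_eq
    · have hne' : pvHis (vs.map pvQuad) bs ≠ [] := by
        intro h; rw [h] at hhis_len; simp at hhis_len; omega
      obtain ⟨i, hi', hMi⟩ := List.mem_iff_getElem.mp (pvMaxv_mem _ hne')
      have hi : i < vs.length := by omega
      have hL2 := h2 _ (vs.getElem_mem hi)
      have hLs := hsle _ (vs.getElem_mem hi)
      apply (hmem_vals _).mpr
      refine ⟨i, hi, ?_⟩
      rw [← hMi, hhis_get i hi]
      by_cases hb : bs[i]'(by omega)
      · rw [if_pos hb, if_pos hb, pv_quad4 _ hL2]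
        exact (pv_tail_max _ hL2 hLs).1
      · rw [if_neg hb, if_neg hb, pv_quad3 _ hL2]
        exact (pv_dropLast_max _ hL2 hLs).1
    · intro y hy
      obtain ⟨i, hi, hy'⟩ := (hmem_vals y).mp hy
      have hL2 := h2 _ (vs.getElem_mem hi)
      have hLs := hsle _ (vs.getElem_mem hi)
      have hstep : y ≤ (pvHis (vs.map pvQuad) bs)[i]'(by omega) := by
        rw [hhis_get i hi]
        by_cases hb : bs[i]'(by omega)
        · rw [if_pos hb, pv_quad4 _ hL2]
          rw [if_pos hb] at hy'
          exact (pv_tail_max _ hL2 hLs).2 y hy'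
        · rw [if_neg hb, pv_quad3 _ hL2]
          rw [if_neg hb] at hy'
          exact (pv_dropLast_max _ hL2 hLs).2 y hy'
      exact le_trans hstep (pvMaxv_ge _ (List.getElem_mem _))
  have hmin : pvMinv ((PySem.List.enumerate vs 0).flatMap (fun p =>
        if PySem.List.pyGetD bs p.1 true then
          PySem.List.slice p.2 (some 1) none
        else
          PySem.List.slice p.2 none (some (-1)))) = pvMinv (pvLos (vs.map pvQuad) bs) := by
    apply pvMinv_eq
    · have hne' : pvLos (vs.map pvQuad) bs ≠ [] := by
        intro h; rw [h] at hlos_len; simp at hlos_len; omega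
      obtain ⟨i, hi', hMi⟩ := List.mem_iff_getElem.mp (pvMinv_mem _ hne')
      have hi : i < vs.length := by omega
      have hL2 := h2 _ (vs.getElem_mem hi)
      have hLs := hsle _ (vs.getElem_mem hi)
      apply (hmem_vals _).mpr
      refine ⟨i, hi, ?_⟩
      rw [← hMi, hlos_get i hi]
      by_cases hb : bs[i]'(by omega)
      · rw [if_pos hb, if_pos hb, pv_quad2 _ hL2]
        exact (pv_tail_min _ hL2 hLs).1
      · rw [if_neg hb, if_neg hb, pv_quad1 _ hL2]
        exact (pv_dropLast_min _ hL2 hLs).1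
    · intro y hy
      obtain ⟨i, hi, hy'⟩ := (hmem_vals y).mp hy
      have hL2 := h2 _ (vs.getElem_mem hi)
      have hLs := hsle _ (vs.getElem_mem hi)
      have hstep : (pvLos (vs.map pvQuad) bs)[i]'(by omega) ≤ y := by
        rw [hlos_get i hi]
        by_cases hb : bs[i]'(by omega)
        · rw [if_pos hb, pv_quad2 _ hL2]
          rw [if_pos hb] at hy'
          exact (pv_tail_min _ hL2 hLs).2 y hy'
        · rw [if_neg hb, pv_quad1 _ hL2]
          rw [if_neg hb] at hy'
          exact (pv_dropLast_min _ hL2 hLs).2 y hy'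
      exact le_trans (pvMinv_le _ (List.getElem_mem _)) hstep
  rw [← hmax, ← hmin]
  rfl



-- generic spec of A's running-minimum loop
theorem pv_foldl_runmin (g : List Bool → Int) (l : List (List Bool)) (init : Int) :
    (l.foldl (fun a x => if g x < a then g x else a) init = init ∨
      ∃ x ∈ l, l.foldl (fun a x => if g x < a then g x else a) init = g x) ∧
    l.foldl (fun a x => if g x < a then g x else a) init ≤ init ∧
    ∀ x ∈ l, l.foldl (fun a x => if g x < a then g x else a) init ≤ g x := by
  induction l generalizing init with
  | nil => simp
  | cons h t ih =>
    simp only [List.foldl_cons]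
    by_cases hlt : g h < init
    · rw [if_pos hlt]
      rcases ih (g h) with ⟨hmem, hle, hall⟩
      refine ⟨?_, by omega, ?_⟩
      · rcases hmem with heq | ⟨x, hx, heq⟩
        · right; exact ⟨h, List.mem_cons_self .., heq⟩
        · right; exact ⟨x, List.mem_cons_of_mem _ hx, heq⟩
      · intro x hx
        rcases List.mem_cons.mp hx with rfl | hx'
        · exact hle
        · exact hall x hx'
    · rw [if_neg hlt]
      rcases ih init with ⟨hmem, hle, hall⟩
      refine ⟨?_, hle, ?_⟩
      · rcases hmem with heq | ⟨x, hx, heq⟩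
        · left; exact heq
        · right; exact ⟨x, List.mem_cons_of_mem _ hx, heq⟩
      · intro x hx
        rcases List.mem_cons.mp hx with rfl | hx'
        · omega
        · exact hall x hx'

-- generic spec of B's optional running-minimum loop
def pvStep (feas : Int → Bool) (val : Int → Int) (best : Option Int) (m : Int) : Option Int :=
  if feas m then
    match best with
    | none => some (val m)
    | some b => if val m < b then some (val m) else some b
  else best

theorem pvStep_none (feas : Int → Bool) (val : Int → Int) (m : Int) :
    pvStep feas val none m = if feas m then some (val m) else none := rfl

theorem pvStep_some (feas : Int → Bool) (val : Int → Int) (b m : Int) :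
    pvStep feas val (some b) m =
      if feas m then (if val m < b then some (val m) else some b) else some b := rfl

theorem pv_optfold_mono (feas : Int → Bool) (val : Int → Int) (l : List Int) :
    ∀ (v0 v : Int),
      l.foldl (pvStep feas val) (some v0) = some v → v ≤ v0 := by
  induction l with
  | nil => intro v0 v hf; simp at hf; omega
  | cons h t ih =>
    intro v0 v hf
    rw [List.foldl_cons, pvStep_some] at hf
    by_cases hfe : feas h
    · rw [if_pos hfe] at hf
      by_cases hlt : val h < v0
      · rw [if_pos hlt] at hf
        have := ih (val h) v hf
        omega
      · rw [if_neg hlt] at hf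
        exact ih v0 v hf
    · rw [if_neg hfe] at hf
      exact ih v0 v hf

theorem pv_optfold_isSome (feas : Int → Bool) (val : Int → Int) (l : List Int) :
    ∀ (b : Option Int) (m : Int), m ∈ l → feas m →
      (l.foldl (pvStep feas val) b).isSome := by
  have hsome : ∀ (t : List Int) (v0 : Int), (t.foldl (pvStep feas val) (some v0)).isSome := by
    intro t
    induction t with
    | nil => simp
    | cons h t ih =>
      intro v0
      rw [List.foldl_cons, pvStep_some]
      by_cases hfe : feas h
      · rw [if_pos hfe]
        by_cases hlt : val h < v0
        · rw [if_pos hlt]; exact ih _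
        · rw [if_neg hlt]; exact ih _
      · rw [if_neg hfe]; exact ih _
  induction l with
  | nil => intro _ _ hm; simp at hm
  | cons h t ih =>
    intro b m hm hfm
    rw [List.foldl_cons]
    rcases List.mem_cons.mp hm with rfl | hm'
    · rcases b with _ | v0
      · rw [pvStep_none, if_pos hfm]; exact hsome t _
      · rw [pvStep_some, if_pos hfm]
        by_cases hlt : val m < v0
        · rw [if_pos hlt]; exact hsome t _
        · rw [if_neg hlt]; exact hsome t _
    · exact ih _ m hm' hfm

theorem pv_optfold_val (feas : Int → Bool) (val : Int → Int) (l : List Int) :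
    ∀ (b : Option Int) (v : Int),
      l.foldl (pvStep feas val) b = some v →
      b = some v ∨ ∃ m ∈ l, feas m = true ∧ v = val m := by
  induction l with
  | nil => intro b v hf; left; simpa using hf
  | cons h t ih =>
    intro b v hf
    rw [List.foldl_cons] at hf
    by_cases hfe : feas h
    · rcases b with _ | v0
      · rw [pvStep_none, if_pos hfe] at hf
        rcases ih _ v hf with heq | ⟨m, hm, hfm, hv⟩
        · right; exact ⟨h, List.mem_cons_self .., hfe, by simpa using heq.symm⟩
        · right; exact ⟨m, List.mem_cons_of_mem _ hm, hfm, hv⟩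
      · rw [pvStep_some, if_pos hfe] at hf
        by_cases hlt : val h < v0
        · rw [if_pos hlt] at hf
          rcases ih _ v hf with heq | ⟨m, hm, hfm, hv⟩
          · right; exact ⟨h, List.mem_cons_self .., hfe, by simpa using heq.symm⟩
          · right; exact ⟨m, List.mem_cons_of_mem _ hm, hfm, hv⟩
        · rw [if_neg hlt] at hf
          rcases ih _ v hf with heq | ⟨m, hm, hfm, hv⟩
          · left; exact heq
          · right; exact ⟨m, List.mem_cons_of_mem _ hm, hfm, hv⟩
    · have hstep : pvStep feas val b h = b := by
        rcases b with _ | v0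
        · rw [pvStep_none, if_neg hfe]
        · rw [pvStep_some, if_neg hfe]
      rw [hstep] at hf
      rcases ih _ v hf with heq | ⟨m, hm, hfm, hv⟩
      · left; exact heq
      · right; exact ⟨m, List.mem_cons_of_mem _ hm, hfm, hv⟩

theorem pv_optfold_min (feas : Int → Bool) (val : Int → Int) (l : List Int) :
    ∀ (b : Option Int) (m : Int), m ∈ l → feas m → ∀ v,
      l.foldl (pvStep feas val) b = some v → v ≤ val m := by
  induction l with
  | nil => intro _ m hm; simp at hm
  | cons h t ih =>
    intro b m hm hfm v hf
    rw [List.foldl_cons] at hf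
    rcases List.mem_cons.mp hm with rfl | hm'
    · rcases b with _ | v0
      · rw [pvStep_none, if_pos hfm] at hf
        exact pv_optfold_mono feas val t (val m) v hf
      · rw [pvStep_some, if_pos hfm] at hf
        by_cases hlt : val m < v0
        · rw [if_pos hlt] at hf
          exact pv_optfold_mono feas val t (val m) v hf
        · rw [if_neg hlt] at hf
          have := pv_optfold_mono feas val t v0 v hf
          omega
    · exact ih _ m hm' hfm v hf

def pvFeas (os : List (Int × Int × Int × Int)) (m : Int) : Bool :=
  os.all (fun o => decide (m ≤ o.2.1))

def pvVal (os : List (Int × Int × Int × Int)) (m : Int) : Int :=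
  (PySem.List.max? (os.map (fun o => if m ≤ o.1 then o.2.2.1 else o.2.2.2)) (fun x => x)).getD 0
    - m + 1

-- the combinatorial core: exponential enumeration = candidate-minimum sweep
theorem pv_core (vs : List (List Int)) (N : Int)
    (hne : vs ≠ [])
    (h2 : ∀ L ∈ vs, 2 ≤ L.length)
    (hsort : ∀ L ∈ vs, L.Pairwise (· < ·))
    (hbound : ∀ L ∈ vs, ∀ x ∈ L, 0 ≤ x ∧ x < N) :
    pvAfold vs N = pvBcalc (vs.map pvQuad) := by
  have hkpos : 0 < vs.length := List.length_pos_of_ne_nil hne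
  set os := vs.map pvQuad with hos
  have hoslen : os.length = vs.length := by simp [hos]
  have hosne : os ≠ [] := by
    intro h; rw [h] at hoslen; simp at hoslen; omega
  have hsle : ∀ L ∈ vs, L.Pairwise (· ≤ ·) := fun L hL => (hsort L hL).imp le_of_lt
  -- componentwise facts about the quadruples
  have hcomp : ∀ o ∈ os, o.1 ≤ o.2.1 ∧ o.2.2.1 ≤ o.2.2.2 ∧ o.1 ≤ o.2.2.1 ∧ o.2.1 ≤ o.2.2.2 := by
    intro o ho
    obtain ⟨L, hL, rfl⟩ := List.mem_map.mp ho
    have hL2 := h2 L hL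
    have hLs := hsle L hL
    rw [pv_quad1 L hL2, pv_quad2 L hL2, pv_quad3 L hL2, pv_quad4 L hL2]
    exact ⟨pv_sorted_getElem_mono L hLs (by omega) (by omega),
      pv_sorted_getElem_mono L hLs (by omega) (by omega),
      pv_sorted_getElem_mono L hLs (by omega) (by omega),
      pv_sorted_getElem_mono L hLs (by omega) (by omega)⟩
  have hrange : ∀ o ∈ os, 0 ≤ o.1 ∧ o.2.2.1 < N ∧ o.2.2.2 < N := by
    intro o ho
    obtain ⟨L, hL, rfl⟩ := List.mem_map.mp ho
    have hL2 := h2 L hL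
    rw [pv_quad1 L hL2, pv_quad3 L hL2, pv_quad4 L hL2]
    exact ⟨(hbound L hL _ (List.getElem_mem _)).1,
      (hbound L hL _ (List.getElem_mem _)).2, (hbound L hL _ (List.getElem_mem _)).2⟩
  -- B's computation
  have hB : pvBcalc os =
      ((os.map (fun o => o.1) ++ os.map (fun o => o.2.1)).foldl
        (pvStep (pvFeas os) (pvVal os)) none).getD 0 := by
    rw [pvBcalc, if_neg hosne]
    rfl
  set cands := os.map (fun o => o.1) ++ os.map (fun o => o.2.1) with hcands
  -- the spans A computes, as max/min of the chosen quadruple components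
  have hgA : ∀ bs ∈ pvProductTF vs.length,
      (fun (isFirsts : List Bool) =>
        (PySem.List.max? ((PySem.List.enumerate vs 0).foldl
            (fun vals p =>
              if PySem.List.pyGetD isFirsts p.1 true then
                vals ++ PySem.List.slice p.2 (some 1) none
              else
                vals ++ PySem.List.slice p.2 none (some (-1))) []) (fun x => x)).getD 0
        - (PySem.List.min? ((PySem.List.enumerate vs 0).foldl
            (fun vals p =>
              if PySem.List.pyGetD isFirsts p.1 true then
                vals ++ PySem.List.slice p.2 (some 1) none
              else
                vals ++ PySem.List.slice p.2 none (some (-1))) []) (fun x => x)).getD 0 + 1) bs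
      = pvMaxv (pvHis os bs) - pvMinv (pvLos os bs) + 1 := by
    intro bs hbs
    exact pv_span_eq vs bs hne ((pv_mem_productTF _ _).mp hbs) h2 hsort
  -- A's fold spec
  have hAfold : pvAfold vs N = (pvProductTF vs.length).foldl
      (fun a x => if (pvMaxv (pvHis os x) - pvMinv (pvLos os x) + 1) < a
        then (pvMaxv (pvHis os x) - pvMinv (pvLos os x) + 1) else a) N := by
    rw [pvAfold]
    apply PySem.List.foldl_congr_mem
    intro acc x hx
    simp only [← hgA x hx]
  have hrun := pv_foldl_runmin (fun x => pvMaxv (pvHis os x) - pvMinv (pvLos os x) + 1)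
    (pvProductTF vs.length) N
  rcases hrun with ⟨hrmem, hrle, hrall⟩
  -- a feasible candidate exists: the smallest first-occurrence
  have hfirstsne : os.map (fun o => o.1) ≠ [] := by
    intro h; apply hosne; simpa using h
  have hmf_mem : pvMinv (os.map (fun o => o.1)) ∈ cands :=
    List.mem_append_left _ (pvMinv_mem _ hfirstsne)
  have hmf_feas : pvFeas os (pvMinv (os.map (fun o => o.1))) = true := by
    rw [pvFeas, List.all_eq_true]
    intro o ho
    have h1 : pvMinv (os.map (fun o => o.1)) ≤ o.1 :=
      pvMinv_le _ (List.mem_map_of_mem ho)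
    have := (hcomp o ho).1
    simp only [decide_eq_true_eq]
    omega
  obtain ⟨v, hv⟩ := Option.isSome_iff_exists.mp
    (pv_optfold_isSome (pvFeas os) (pvVal os) cands none _ hmf_mem hmf_feas)
  -- lengths of his/los
  have hhis_len : ∀ bs : List Bool, bs.length = vs.length → (pvHis os bs).length = vs.length := by
    intro bs hlen; simp [pvHis, hlen, hoslen]
  have hlos_len : ∀ bs : List Bool, bs.length = vs.length → (pvLos os bs).length = vs.length := by
    intro bs hlen; simp [pvLos, hlen, hoslen]
  have hhis_get : ∀ (bs : List Bool) (hlen : bs.length = vs.length) (i : Nat) (hi : i < vs.length),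
      (pvHis os bs)[i]'(by rw [hhis_len bs hlen]; omega) =
        if bs[i]'(by omega) then (os[i]'(by omega)).2.2.2 else (os[i]'(by omega)).2.2.1 := by
    intro bs hlen i hi
    simp [pvHis, List.getElem_zip]
  have hlos_get : ∀ (bs : List Bool) (hlen : bs.length = vs.length) (i : Nat) (hi : i < vs.length),
      (pvLos os bs)[i]'(by rw [hlos_len bs hlen]; omega) =
        if bs[i]'(by omega) then (os[i]'(by omega)).2.1 else (os[i]'(by omega)).1 := by
    intro bs hlen i hi
    simp [pvLos, List.getElem_zip]
  -- v is at most N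
  have hvN : v ≤ N := by
    have hle := pv_optfold_min (pvFeas os) (pvVal os) cands none _ hmf_mem hmf_feas v hv
    have hmap_ne : os.map (fun o => if pvMinv (os.map (fun o => o.1)) ≤ o.1
        then o.2.2.1 else o.2.2.2) ≠ [] := by
      intro h; apply hosne; simpa using h
    have hmx := pvMaxv_mem _ hmap_ne
    obtain ⟨o, ho, hoe⟩ := List.mem_map.mp hmx
    have hoN := hrange o ho
    have h0 : 0 ≤ pvMinv (os.map (fun o => o.1)) := by
      obtain ⟨o', ho', hoe'⟩ := List.mem_map.mp (pvMinv_mem _ hfirstsne)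
      have := (hrange o' ho').1
      omega
    rw [pvVal] at hle
    have hmaxN : pvMaxv (os.map (fun o => if pvMinv (os.map (fun o => o.1)) ≤ o.1
        then o.2.2.1 else o.2.2.2)) < N := by
      rw [← hoe]
      split_ifs <;> omega
    rw [pvMaxv] at hmaxN
    omega
  -- v ≤ every span A examines
  have hv_le_span : ∀ bs ∈ pvProductTF vs.length,
      v ≤ pvMaxv (pvHis os bs) - pvMinv (pvLos os bs) + 1 := by
    intro bs hbs
    have hlen : bs.length = vs.length := (pv_mem_productTF _ _).mp hbs
    have hlosne : pvLos os bs ≠ [] := by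
      intro h
      have := hlos_len bs hlen
      rw [h] at this; simp at this; omega
    obtain ⟨i, hi', hMi⟩ := List.mem_iff_getElem.mp (pvMinv_mem _ hlosne)
    have hi : i < vs.length := by
      have := hlos_len bs hlen; omega
    set m := pvMinv (pvLos os bs) with hm
    -- m is a candidate
    have hm_cand : m ∈ cands := by
      rw [← hMi, hlos_get bs hlen i hi]
      by_cases hb : bs[i]'(by omega)
      · rw [if_pos hb]
        exact List.mem_append_right _ (List.mem_map_of_mem (List.getElem_mem _))
      · rw [if_neg hb]
        exact List.mem_append_left _ (List.mem_map_of_mem (List.getElem_mem _))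
    -- m is feasible
    have hm_feas : pvFeas os m = true := by
      rw [pvFeas, List.all_eq_true]
      intro o ho
      obtain ⟨j, hj, rfl⟩ := List.mem_iff_getElem.mp ho
      have hjv : j < vs.length := by omega
      have hmle : m ≤ (pvLos os bs)[j]'(by rw [hlos_len bs hlen]; omega) :=
        pvMinv_le _ (List.getElem_mem _)
      rw [hlos_get bs hlen j hjv] at hmle
      have hc := (hcomp (os[j]'hj) (List.getElem_mem _)).1
      simp only [decide_eq_true_eq]
      by_cases hb : bs[j]'(by omega)
      · rw [if_pos hb] at hmle; omega
      · rw [if_neg hb] at hmle; omega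
    have hle := pv_optfold_min (pvFeas os) (pvVal os) cands none m hm_cand hm_feas v hv
    rw [pvVal] at hle
    -- the greedy maxima are below the chosen maxima
    have hmap_ne : os.map (fun o => if m ≤ o.1 then o.2.2.1 else o.2.2.2) ≠ [] := by
      intro h; apply hosne; simpa using h
    obtain ⟨i0, hi0', hM0⟩ := List.mem_iff_getElem.mp (pvMaxv_mem _ hmap_ne)
    have hi0 : i0 < vs.length := by
      rw [List.length_map] at hi0'; omega
    have hmaxle : pvMaxv (os.map (fun o => if m ≤ o.1 then o.2.2.1 else o.2.2.2))
        ≤ pvMaxv (pvHis os bs) := by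
      rw [← hM0, List.getElem_map]
      have hcj := hcomp (os[i0]'(by omega)) (List.getElem_mem _)
      have hstep : (if m ≤ (os[i0]'(by omega)).1 then (os[i0]'(by omega)).2.2.1
          else (os[i0]'(by omega)).2.2.2)
          ≤ (pvHis os bs)[i0]'(by rw [hhis_len bs hlen]; omega) := by
        rw [hhis_get bs hlen i0 hi0]
        by_cases hmo : m ≤ (os[i0]'(by omega)).1
        · rw [if_pos hmo]
          split_ifs <;> omega
        · rw [if_neg hmo]
          -- the first occurrence is below m, so this letter must have chosen drop-first
          have hb : bs[i0]'(by omega) = true := by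
            by_contra hbf
            have hmle : m ≤ (pvLos os bs)[i0]'(by rw [hlos_len bs hlen]; omega) :=
              pvMinv_le _ (List.getElem_mem _)
            rw [hlos_get bs hlen i0 hi0, if_neg (by simpa using hbf)] at hmle
            omega
          rw [if_pos hb]
      exact le_trans hstep (pvMaxv_ge _ (List.getElem_mem _))
    simp only [pvMaxv] at hmaxle hle ⊢
    omega
  -- every B value is achieved (up to ≥) by some choice vector
  have hr_le_v : pvAfold vs N ≤ v := by
    rcases pv_optfold_val (pvFeas os) (pvVal os) cands none v hv with hnone | ⟨m, hm, hmf, hveq⟩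
    · simp at hnone
    · set bs := os.map (fun o => decide (o.1 < m)) with hbs
      have hlen : bs.length = vs.length := by simp [hbs, hoslen]
      have hbsmem : bs ∈ pvProductTF vs.length := (pv_mem_productTF _ _).mpr hlen
      have hr := hrall bs hbsmem
      rw [hAfold]
      refine le_trans hr ?_
      -- his = the greedy maxima list
      have hhis_eq : pvHis os bs = os.map (fun o => if m ≤ o.1 then o.2.2.1 else o.2.2.2) := by
        apply List.ext_getElem
        · rw [hhis_len bs hlen, List.length_map, hoslen]
        · intro i hi1 hi2
          have hiv : i < vs.length := by rw [hhis_len bs hlen] at hi1; omega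
          rw [hhis_get bs hlen i hiv, List.getElem_map]
          simp only [List.getElem_map, decide_eq_true_eq]
          split_ifs with h1 h2 <;> omega
      -- every chosen low is at least m
      have hlos_ge : m ≤ pvMinv (pvLos os bs) := by
        have hlosne : pvLos os bs ≠ [] := by
          intro h
          have := hlos_len bs hlen
          rw [h] at this; simp at this; omega
        obtain ⟨j, hj', hMj⟩ := List.mem_iff_getElem.mp (pvMinv_mem _ hlosne)
        have hjv : j < vs.length := by
          have := hlos_len bs hlen; omega
        rw [← hMj, hlos_get bs hlen j hjv]
        have hfe : m ≤ (os[j]'(by omega)).2.1 := by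
          rw [pvFeas, List.all_eq_true] at hmf
          have := hmf (os[j]'(by omega)) (List.getElem_mem (by omega))
          simpa using this
        simp only [hbs, List.getElem_map, decide_eq_true_eq]
        split_ifs with h1 <;> omega
      rw [hveq, pvVal, hhis_eq]
      simp only [pvMaxv] at hlos_ge ⊢
      omega
  -- conclude
  have hv_le_r : v ≤ pvAfold vs N := by
    rw [hAfold]
    rcases hrmem with heq | ⟨bs, hbs, heq⟩
    · rw [heq]; exact hvN
    · rw [heq]; exact hv_le_span bs hbs
  have hBv : pvBcalc os = v := by rw [hB, hv]; rfl
  omega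

-- ===== VERDICT (by name: the statement is the Claim_ definition above) =====
theorem getShortestSubstring_spec : Claim_equal_getShortestSubstring := by
  intro s _
  unfold Spec_getShortestSubstring
  rw [pv_A_eq, pv_B_eq]
  by_cases h0 : (pvDupChars s).length = 0
  · rw [if_pos h0]
    have hnil : pvDupChars s = [] := List.length_eq_zero_iff.mp h0
    rw [pvVlists, hnil]
    rfl
  · rw [if_neg h0]
    apply pv_core
    · intro h
      apply h0
      rw [pvVlists] at h
      simpa using congrArg List.length h
    · intro L hL
      obtain ⟨c, hc, rfl⟩ := List.mem_map.mp hL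
      rw [pvDupChars, List.mem_filter] at hc
      simpa using hc.2
    · intro L hL
      obtain ⟨c, _, rfl⟩ := List.mem_map.mp hL
      exact pv_idxList_sorted s c
    · intro L hL x hx
      obtain ⟨c, _, rfl⟩ := List.mem_map.mp hL
      have := pv_idxList_bounds s c x hx
      rw [PySem.Str.len_eq]
      exact this
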